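-- pv_equiv track=rewrite | github.com/YuchanJung/ps | string/[프로그래머스]Lv1. 81301. 숫자 문자열과 영단어/solution.py | solution
-- ===== SOURCE A (Python) =====
-- def solution(s):
--     answer = 0
--     numbers = ['0', '1', '2', '3', '4', '5', '6', '7', '8', '9']
--     l = len(s)
--     i = 0
--     while i < l:
--         if s[i] in numbers:
--             add_num = int(s[i])
--             i += 1
--         elif s[i] == 'z':
--             add_num = 0
--             i += 4
--         elif s[i] == 'o':
--             add_num = 1
--             i += 3
--         elif s[i] == 't':
--             if s[i + 1] == 'w':
--                 add_num = 2
--                 i += 3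
--             else:
--                 add_num = 3
--                 i += 5
--         elif s[i] == 'f':
--             if s[i + 1] == 'o':
--                 add_num = 4
--             else:
--                 add_num = 5
--             i += 4
--         elif s[i] == 's':
--             if s[i + 1] == 'i':
--                 add_num = 6
--                 i += 3
--             else:
--                 add_num = 7
--                 i += 5
--         elif s[i] == 'e':
--             add_num = 8
--             i += 5
--         elif s[i] == 'n':
--             add_num = 9
--             i += 4
--         answer = answer * 10 + add_num
--
--     return answer
-- ===== SOURCE B (Python) =====
-- # Recursive suffix evaluation: value(i) returns the (integer value, digit count) of the
-- # token sequence starting at position i, combining each token as d * 10**m + v (most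
-- # significant digit first) instead of an accumulator.
-- def _token(s, i):
--     """The digit and width of the token read at position i, or None when none is read."""
--     c = s[i]
--     if c.isdigit():
--         return int(c), 1
--     if c == 'z':
--         return 0, 4
--     if c == 'o':
--         return 1, 3
--     if c == 't':
--         if i + 1 >= len(s):
--             return None
--         return (2, 3) if s[i + 1] == 'w' else (3, 5)
--     if c == 'f':
--         if i + 1 >= len(s):
--             return None
--         return (4, 4) if s[i + 1] == 'o' else (5, 4)
--     if c == 's':
--         if i + 1 >= len(s):
--             return None
--         return (6, 3) if s[i + 1] == 'i' else (7, 5)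
--     if c == 'e':
--         return 8, 5
--     if c == 'n':
--         return 9, 4
--     return None
--
--
-- def solution(s):
--     n = len(s)
--
--     def value(i):
--         if i >= n:
--             return 0, 0
--         t = _token(s, i)
--         if t is None:
--             return 0, 0
--         d, k = t
--         v, m = value(i + k)
--         return d * 10 ** m + v, m + 1
--
--     return value(0)[0]
-- ===== Notes on version B (the rewrite author's own statement) =====
-- stated objective: alternative
-- what changed: A's iterative cursor loop with a Horner accumulator (answer = answer*10 + d) becomes a recursive suffix evaluator: a _token helper classifies the token at one position, and value(i) returns the (value, digit count) pair of the whole suffix from i, combining tokens most-significant-first as d * 10**m + v; the equivalence proof shows A's left-to-right fold equals this right-fold composition.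
import Mathlib
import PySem

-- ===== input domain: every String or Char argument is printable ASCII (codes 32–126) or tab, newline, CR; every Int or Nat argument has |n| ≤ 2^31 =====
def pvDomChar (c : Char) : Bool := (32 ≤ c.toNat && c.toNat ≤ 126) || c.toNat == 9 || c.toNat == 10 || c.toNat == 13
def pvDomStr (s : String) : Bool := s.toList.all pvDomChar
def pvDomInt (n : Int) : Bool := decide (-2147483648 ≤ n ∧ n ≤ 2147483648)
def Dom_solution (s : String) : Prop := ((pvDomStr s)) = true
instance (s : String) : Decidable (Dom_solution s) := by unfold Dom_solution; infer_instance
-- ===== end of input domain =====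

-- B replaces A's iterative cursor loop accumulating answer*10+d by a recursive suffix
-- evaluator: value(i) returns the (value, digit count) of the token sequence from i and
-- tokens are combined most-significant-first as d * 10^m + v (objective: alternative);
-- equivalence is proved on Pre_solution = the inputs where A terminates normally.

-- ===== PORT A =====
-- The while loop over index i becomes structural recursion on a fuel counter; every matching
-- branch advances i by at least 1 while the loop runs only while i < len(s), so fuel = len(s)
-- covers every iteration the Python loop performs on an input admitted by Pre_solution.
-- On the `none` / no-branch paths Python raises (IndexError / NameError) or loops forever;
-- those inputs are outside Pre_solution and the port returns the current answer there.
def solutionGo (cs : List Char) (l : Nat) (fuel : Nat) (i : Nat) (answer : Int) : Int :=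
  match fuel with
  | 0 => answer
  | fuel + 1 =>
    if i < l then
      match PySem.List.pyGet? cs (i : Int) with
      | none => answer  -- unreachable while i < l
      | some c =>
        if c ∈ ['0', '1', '2', '3', '4', '5', '6', '7', '8', '9'] then
          -- int(s[i]) on a digit character is exactly c.toNat - 48
          solutionGo cs l fuel (i + 1) (answer * 10 + ((c.toNat : Int) - 48))
        else if c = 'z' then solutionGo cs l fuel (i + 4) (answer * 10 + 0)
        else if c = 'o' then solutionGo cs l fuel (i + 3) (answer * 10 + 1)
        else if c = 't' then
          match PySem.List.pyGet? cs ((i : Int) + 1) with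
          | none => answer  -- Python: IndexError
          | some c2 =>
            if c2 = 'w' then solutionGo cs l fuel (i + 3) (answer * 10 + 2)
            else solutionGo cs l fuel (i + 5) (answer * 10 + 3)
        else if c = 'f' then
          match PySem.List.pyGet? cs ((i : Int) + 1) with
          | none => answer  -- Python: IndexError
          | some c2 =>
            if c2 = 'o' then solutionGo cs l fuel (i + 4) (answer * 10 + 4)
            else solutionGo cs l fuel (i + 4) (answer * 10 + 5)
        else if c = 's' then
          match PySem.List.pyGet? cs ((i : Int) + 1) with
          | none => answer  -- Python: IndexError
          | some c2 =>
            if c2 = 'i' then solutionGo cs l fuel (i + 3) (answer * 10 + 6)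
            else solutionGo cs l fuel (i + 5) (answer * 10 + 7)
        else if c = 'e' then solutionGo cs l fuel (i + 5) (answer * 10 + 8)
        else if c = 'n' then solutionGo cs l fuel (i + 4) (answer * 10 + 9)
        else answer  -- Python: NameError on the first iteration, otherwise an infinite loop
    else answer

def solution (s : String) : Int :=
  solutionGo s.toList s.toList.length s.toList.length 0 0

-- ===== PORT B =====
-- _token(s, i): the digit and width of the token at position i, or none.  s[i] is read with
-- pyGet? (Source B only calls it with 0 ≤ i < n, where it never raises); c.isdigit() on the
-- one-character string s[i] is PySem.Chars.strIsdigit [c]; int(c) on a digit character is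
-- exactly c.toNat - 48.
def tokenOf (cs : List Char) (n : Nat) (i : Nat) : Option (Int × Nat) :=
  match PySem.List.pyGet? cs (i : Int) with
  | none => none  -- unreachable: value only calls _token with i < n
  | some c =>
    if PySem.Chars.strIsdigit [c] then some ((c.toNat : Int) - 48, 1)
    else if c = 'z' then some (0, 4)
    else if c = 'o' then some (1, 3)
    else if c = 't' then
      if n ≤ i + 1 then none
      else
        match PySem.List.pyGet? cs ((i : Int) + 1) with
        | none => none
        | some c2 => if c2 = 'w' then some (2, 3) else some (3, 5)
    else if c = 'f' then
      if n ≤ i + 1 then none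
      else
        match PySem.List.pyGet? cs ((i : Int) + 1) with
        | none => none
        | some c2 => if c2 = 'o' then some (4, 4) else some (5, 4)
    else if c = 's' then
      if n ≤ i + 1 then none
      else
        match PySem.List.pyGet? cs ((i : Int) + 1) with
        | none => none
        | some c2 => if c2 = 'i' then some (6, 3) else some (7, 5)
    else if c = 'e' then some (8, 5)
    else if c = 'n' then some (9, 4)
    else none

-- value(i) of Source B; the recursion advances i by the token width k ≥ 1 and stops at i ≥ n,
-- so its depth is at most n - i and fuel = n covers it.
def valueGo (cs : List Char) (n : Nat) (fuel : Nat) (i : Nat) : Int × Nat :=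
  match fuel with
  | 0 => (0, 0)  -- unreachable with fuel = n
  | fuel + 1 =>
    if n ≤ i then (0, 0)
    else
      match tokenOf cs n i with
      | none => (0, 0)
      | some dk =>
        let vm := valueGo cs n fuel (i + dk.2)
        (dk.1 * 10 ^ vm.2 + vm.1, vm.2 + 1)

def solution_alt (s : String) : Int :=
  (valueGo s.toList s.toList.length s.toList.length 0).1

-- ===== PRECONDITION & SPEC =====
-- Pre_solution holds exactly on the inputs where Python A terminates normally (returns a
-- value): at every cursor position the character must be a digit or one of z,o,t,f,s,e,n
-- (otherwise A raises NameError or loops forever), and a t/f/s must not be the last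
-- character (otherwise s[i + 1] raises IndexError).  pvTerm states this as acceptance by
-- the jump grammar on the remaining characters.  Its Nat argument only drives structural
-- recursion: any n ≥ length gives the same verdict (aTermFuel_mono below), and Pre_solution
-- instantiates it with the string's length.
-- No input on which A returns a value is excluded.
def aTermFuel : Nat → List Char → Bool
  | _, [] => true
  | 0, _ :: _ => false
  | n + 1, c :: r =>
    if c ∈ ['0', '1', '2', '3', '4', '5', '6', '7', '8', '9'] then aTermFuel n r
    else if c = 'z' then aTermFuel n (r.drop 3)
    else if c = 'o' then aTermFuel n (r.drop 2)
    else if c = 't' then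
      match r with
      | [] => false
      | c2 :: _ => if c2 = 'w' then aTermFuel n (r.drop 2) else aTermFuel n (r.drop 4)
    else if c = 'f' then
      match r with
      | [] => false
      | _ :: _ => aTermFuel n (r.drop 3)
    else if c = 's' then
      match r with
      | [] => false
      | c2 :: _ => if c2 = 'i' then aTermFuel n (r.drop 2) else aTermFuel n (r.drop 4)
    else if c = 'e' then aTermFuel n (r.drop 4)
    else if c = 'n' then aTermFuel n (r.drop 3)
    else false

def Pre_solution (s : String) : Prop := aTermFuel s.toList.length s.toList = true

instance (s : String) : Decidable (Pre_solution s) := by unfold Pre_solution; infer_instance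

def pvWitness_solution : String := "one4two"

def Spec_solution (s : String) (out : Int) : Prop := out = solution_alt s
instance (s : String) (out : Int) : Decidable (Spec_solution s out) := by unfold Spec_solution; infer_instance

-- ===== CLAIM =====
def Claim_equal_solution : Prop := ∀ (s : String), Dom_solution s → Pre_solution s → Spec_solution s (solution s)

-- ===== LEMMAS AND PROOFS =====

lemma get_of_drop {α : Type} {cs r : List α} {i : Nat} (h : cs.drop i = r) (j : Nat) :
    cs[i + j]? = r[j]? := by
  subst h
  exact List.getElem?_drop.symm

lemma pyGet_succ (cs : List Char) (i : Nat) :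
    PySem.List.pyGet? cs ((i : Int) + 1) = cs[i + 1]? := by
  rw [show ((i : Int) + 1) = ((i + 1 : Nat) : Int) from by push_cast; ring,
    PySem.List.pyGet?_natCast]

lemma strIsdigit_of_mem {c : Char} (h : c ∈ ['0', '1', '2', '3', '4', '5', '6', '7', '8', '9']) :
    PySem.Chars.strIsdigit [c] = true := by
  fin_cases h <;> decide

-- the fuel argument of aTermFuel is irrelevant once it covers the length of the string
lemma aTermFuel_mono : ∀ (m n : Nat) (cs : List Char), cs.length ≤ m → cs.length ≤ n →
    aTermFuel m cs = aTermFuel n cs := by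
  intro m
  induction m with
  | zero =>
    intro n cs hm _
    cases cs with
    | nil => cases n <;> rfl
    | cons c cs => simp at hm
  | succ m ih =>
    intro n cs hm hn
    cases cs with
    | nil => cases n <;> rfl
    | cons c r =>
      simp only [List.length_cons] at hm hn
      cases n with
      | zero => omega
      | succ n =>
        cases r with
        | nil => simp [aTermFuel]
        | cons c2 r' =>
          simp only [List.length_cons] at hm hn
          simp only [aTermFuel]
          split_ifs <;>
            first
            | rfl
            | (apply ih <;> simp [List.length_drop] <;> omega)

-- extraction lemmas: termination of c :: r forces termination of the suffix after the jump
lemma aTerm_dig {c : Char} {r : List Char}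
    (hdig : c ∈ ['0', '1', '2', '3', '4', '5', '6', '7', '8', '9'])
    (h : aTermFuel (c :: r).length (c :: r) = true) : aTermFuel r.length r = true := by
  simpa [aTermFuel, hdig] using h

lemma aTerm_z {r : List Char} (h : aTermFuel ('z' :: r).length ('z' :: r) = true) :
    aTermFuel (r.drop 3).length (r.drop 3) = true := by
  rw [aTermFuel_mono (r.drop 3).length r.length _ le_rfl (by simp only [List.length_drop]; omega)]
  simpa [aTermFuel] using h

lemma aTerm_o {r : List Char} (h : aTermFuel ('o' :: r).length ('o' :: r) = true) :
    aTermFuel (r.drop 2).length (r.drop 2) = true := by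
  rw [aTermFuel_mono (r.drop 2).length r.length _ le_rfl (by simp only [List.length_drop]; omega)]
  simpa [aTermFuel] using h

lemma aTerm_e {r : List Char} (h : aTermFuel ('e' :: r).length ('e' :: r) = true) :
    aTermFuel (r.drop 4).length (r.drop 4) = true := by
  rw [aTermFuel_mono (r.drop 4).length r.length _ le_rfl (by simp only [List.length_drop]; omega)]
  simpa [aTermFuel] using h

lemma aTerm_n {r : List Char} (h : aTermFuel ('n' :: r).length ('n' :: r) = true) :
    aTermFuel (r.drop 3).length (r.drop 3) = true := by
  rw [aTermFuel_mono (r.drop 3).length r.length _ le_rfl (by simp only [List.length_drop]; omega)]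
  simpa [aTermFuel] using h

lemma aTerm_tw {r' : List Char}
    (h : aTermFuel ('t' :: 'w' :: r').length ('t' :: 'w' :: r') = true) :
    aTermFuel (('w' :: r').drop 2).length (('w' :: r').drop 2) = true := by
  rw [aTermFuel_mono (('w' :: r').drop 2).length ('w' :: r').length _ le_rfl
    (by simp only [List.length_drop]; omega)]
  simpa [aTermFuel] using h

lemma aTerm_t {c2 : Char} {r' : List Char} (hw : c2 ≠ 'w')
    (h : aTermFuel ('t' :: c2 :: r').length ('t' :: c2 :: r') = true) :
    aTermFuel ((c2 :: r').drop 4).length ((c2 :: r').drop 4) = true := by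
  rw [aTermFuel_mono ((c2 :: r').drop 4).length (c2 :: r').length _ le_rfl
    (by simp only [List.length_drop]; omega)]
  simpa [aTermFuel, hw] using h

lemma aTerm_f {c2 : Char} {r' : List Char}
    (h : aTermFuel ('f' :: c2 :: r').length ('f' :: c2 :: r') = true) :
    aTermFuel ((c2 :: r').drop 3).length ((c2 :: r').drop 3) = true := by
  rw [aTermFuel_mono ((c2 :: r').drop 3).length (c2 :: r').length _ le_rfl
    (by simp only [List.length_drop]; omega)]
  simpa [aTermFuel] using h

lemma aTerm_si {r' : List Char}
    (h : aTermFuel ('s' :: 'i' :: r').length ('s' :: 'i' :: r') = true) :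
    aTermFuel (('i' :: r').drop 2).length (('i' :: r').drop 2) = true := by
  rw [aTermFuel_mono (('i' :: r').drop 2).length ('i' :: r').length _ le_rfl
    (by simp only [List.length_drop]; omega)]
  simpa [aTermFuel] using h

lemma aTerm_s {c2 : Char} {r' : List Char} (hw : c2 ≠ 'i')
    (h : aTermFuel ('s' :: c2 :: r').length ('s' :: c2 :: r') = true) :
    aTermFuel ((c2 :: r').drop 4).length ((c2 :: r').drop 4) = true := by
  rw [aTermFuel_mono ((c2 :: r').drop 4).length (c2 :: r').length _ le_rfl
    (by simp only [List.length_drop]; omega)]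
  simpa [aTermFuel, hw] using h
-- a non-digit head character on a terminating suffix is one of the seven branch letters
lemma letter_cases (c : Char) (r : List Char)
    (hdig : c ∉ (['0', '1', '2', '3', '4', '5', '6', '7', '8', '9'] : List Char))
    (h : aTermFuel (c :: r).length (c :: r) = true) :
    c = 'z' ∨ c = 'o' ∨ c = 't' ∨ c = 'f' ∨ c = 's' ∨ c = 'e' ∨ c = 'n' := by
  by_contra hall
  simp only [not_or] at hall
  obtain ⟨h1, h2, h3, h4, h5, h6, h7⟩ := hall
  simp [aTermFuel, hdig, h1, h2, h3, h4, h5, h6, h7] at h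

-- the main induction: where A's jump sequence terminates, A's forward Horner loop and B's
-- suffix recursion (with the same fuel) compute the same number:
-- solutionGo i a  =  a * 10 ^ m + v  where (v, m) = valueGo i
lemma main_loop (cs : List Char) : ∀ (fuel : Nat) (i : Nat) (a : Int),
    cs.length ≤ i + fuel →
    aTermFuel (cs.drop i).length (cs.drop i) = true →
    solutionGo cs cs.length fuel i a =
      a * 10 ^ (valueGo cs cs.length fuel i).2 + (valueGo cs cs.length fuel i).1 := by
  intro fuel
  induction fuel with
  | zero =>
    intro i a _ _
    simp [solutionGo, valueGo]
  | succ f ih =>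
    intro i a hle hval
    by_cases hi : i < cs.length
    · have hne : cs.drop i ≠ [] := by
        intro hnil
        have := congrArg List.length hnil
        simp [List.length_drop] at this
        omega
      cases hd : cs.drop i with
      | nil => exact absurd hd hne
      | cons c r =>
        rw [hd] at hval
        have h0 : cs[i]? = some c := by simpa using get_of_drop hd 0
        by_cases hdig : c ∈ ['0', '1', '2', '3', '4', '5', '6', '7', '8', '9']
        · -- digit chunk
          have hdk : cs.drop (i + 1) = r := by
            rw [← List.drop_drop, hd]
            rfl
          have hstepA : solutionGo cs cs.length (f + 1) i a =
              solutionGo cs cs.length f (i + 1) (a * 10 + ((c.toNat : Int) - 48)) := by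
            simp only [solutionGo, hi, PySem.List.pyGet?_natCast, h0, hdig, if_true]
          have hstepB : valueGo cs cs.length (f + 1) i =
              (((c.toNat : Int) - 48) * 10 ^ (valueGo cs cs.length f (i + 1)).2 + (valueGo cs cs.length f (i + 1)).1,
                (valueGo cs cs.length f (i + 1)).2 + 1) := by
            simp only [valueGo, tokenOf, if_neg (by omega : ¬ cs.length ≤ i),
              PySem.List.pyGet?_natCast, h0, strIsdigit_of_mem hdig, if_true]
          rw [hstepA, hstepB, ih (i + 1) _ (by omega) (by rw [hdk]; exact aTerm_dig hdig hval)]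
          ring
        · rcases letter_cases c r hdig hval with hc | hc | hc | hc | hc | hc | hc
          · -- chunk starting 'z'
            subst hc
            have hdk : cs.drop (i + 4) = r.drop 3 := by
              rw [← List.drop_drop, hd]
              rfl
            have hstepA : solutionGo cs cs.length (f + 1) i a =
                solutionGo cs cs.length f (i + 4) (a * 10 + 0) := by
              simp only [solutionGo, hi, PySem.List.pyGet?_natCast, h0,
                show (('z' : Char) ∈ ['0', '1', '2', '3', '4', '5', '6', '7', '8', '9']) = False from by decide, if_true, if_false]
            have hstepB : valueGo cs cs.length (f + 1) i =
                ((0 : Int) * 10 ^ (valueGo cs cs.length f (i + 4)).2 + (valueGo cs cs.length f (i + 4)).1,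
                  (valueGo cs cs.length f (i + 4)).2 + 1) := by
              simp only [valueGo, tokenOf, if_neg (by omega : ¬ cs.length ≤ i),
                PySem.List.pyGet?_natCast, h0,
                show PySem.Chars.strIsdigit ['z'] = false from by decide, Bool.false_eq_true,
                if_true, if_false]
            rw [hstepA, hstepB, ih (i + 4) (a * 10 + 0) (by omega) (by rw [hdk]; exact aTerm_z hval)]
            ring
          · -- chunk starting 'o'
            subst hc
            have hdk : cs.drop (i + 3) = r.drop 2 := by
              rw [← List.drop_drop, hd]
              rfl
            have hstepA : solutionGo cs cs.length (f + 1) i a =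
                solutionGo cs cs.length f (i + 3) (a * 10 + 1) := by
              simp only [solutionGo, hi, PySem.List.pyGet?_natCast, h0,
                show (('o' : Char) ∈ ['0', '1', '2', '3', '4', '5', '6', '7', '8', '9']) = False from by decide, show (('o' : Char) = 'z') = False from by decide, if_true, if_false]
            have hstepB : valueGo cs cs.length (f + 1) i =
                ((1 : Int) * 10 ^ (valueGo cs cs.length f (i + 3)).2 + (valueGo cs cs.length f (i + 3)).1,
                  (valueGo cs cs.length f (i + 3)).2 + 1) := by
              simp only [valueGo, tokenOf, if_neg (by omega : ¬ cs.length ≤ i),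
                PySem.List.pyGet?_natCast, h0,
                show PySem.Chars.strIsdigit ['o'] = false from by decide, Bool.false_eq_true, show (('o' : Char) = 'z') = False from by decide,
                if_true, if_false]
            rw [hstepA, hstepB, ih (i + 3) (a * 10 + 1) (by omega) (by rw [hdk]; exact aTerm_o hval)]
            ring
          · -- chunk starting 't': needs the second character
            subst hc
            cases r with
            | nil => exact absurd hval (by decide)
            | cons c2 r' =>
              have h1 : cs[i + 1]? = some c2 := by simpa using get_of_drop hd 1
              have hi1 : i + 1 < cs.length := by
                have := congrArg List.length hd
                simp [List.length_drop] at this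
                omega
              by_cases hw : c2 = 'w'
              · subst hw
                have hdk : cs.drop (i + 3) = r'.drop 1 := by
                  rw [← List.drop_drop, hd]
                  rfl
                have hstepA : solutionGo cs cs.length (f + 1) i a =
                    solutionGo cs cs.length f (i + 3) (a * 10 + 2) := by
                  simp only [solutionGo, hi, PySem.List.pyGet?_natCast, h0,
                    show (('t' : Char) ∈ ['0', '1', '2', '3', '4', '5', '6', '7', '8', '9']) = False from by decide, show (('t' : Char) = 'z') = False from by decide, show (('t' : Char) = 'o') = False from by decide, pyGet_succ, h1,
                    if_true, if_false]
                have hstepB : valueGo cs cs.length (f + 1) i =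
                    ((2 : Int) * 10 ^ (valueGo cs cs.length f (i + 3)).2 + (valueGo cs cs.length f (i + 3)).1,
                      (valueGo cs cs.length f (i + 3)).2 + 1) := by
                  simp only [valueGo, tokenOf, if_neg (by omega : ¬ cs.length ≤ i),
                    if_neg (by omega : ¬ cs.length ≤ i + 1), PySem.List.pyGet?_natCast, h0,
                    show PySem.Chars.strIsdigit ['t'] = false from by decide, Bool.false_eq_true, show (('t' : Char) = 'z') = False from by decide, show (('t' : Char) = 'o') = False from by decide,
                    pyGet_succ, h1, if_true, if_false]
                rw [hstepA, hstepB, ih (i + 3) (a * 10 + 2) (by omega) (by rw [hdk]; exact aTerm_tw hval)]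
                ring
              · have hdk : cs.drop (i + 5) = r'.drop 3 := by
                  rw [← List.drop_drop, hd]
                  rfl
                have hstepA : solutionGo cs cs.length (f + 1) i a =
                    solutionGo cs cs.length f (i + 5) (a * 10 + 3) := by
                  simp only [solutionGo, hi, PySem.List.pyGet?_natCast, h0,
                    show (('t' : Char) ∈ ['0', '1', '2', '3', '4', '5', '6', '7', '8', '9']) = False from by decide, show (('t' : Char) = 'z') = False from by decide, show (('t' : Char) = 'o') = False from by decide, pyGet_succ, h1, hw,
                    if_true, if_false]
                have hstepB : valueGo cs cs.length (f + 1) i =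
                    ((3 : Int) * 10 ^ (valueGo cs cs.length f (i + 5)).2 + (valueGo cs cs.length f (i + 5)).1,
                      (valueGo cs cs.length f (i + 5)).2 + 1) := by
                  simp only [valueGo, tokenOf, if_neg (by omega : ¬ cs.length ≤ i),
                    if_neg (by omega : ¬ cs.length ≤ i + 1), PySem.List.pyGet?_natCast, h0,
                    show PySem.Chars.strIsdigit ['t'] = false from by decide, Bool.false_eq_true, show (('t' : Char) = 'z') = False from by decide, show (('t' : Char) = 'o') = False from by decide,
                    pyGet_succ, h1, hw, if_true, if_false]
                rw [hstepA, hstepB, ih (i + 5) (a * 10 + 3) (by omega) (by rw [hdk]; exact aTerm_t hw hval)]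
                ring
          · -- chunk starting 'f': needs the second character
            subst hc
            cases r with
            | nil => exact absurd hval (by decide)
            | cons c2 r' =>
              have h1 : cs[i + 1]? = some c2 := by simpa using get_of_drop hd 1
              have hi1 : i + 1 < cs.length := by
                have := congrArg List.length hd
                simp [List.length_drop] at this
                omega
              by_cases hw : c2 = 'o'
              · subst hw
                have hdk : cs.drop (i + 4) = r'.drop 2 := by
                  rw [← List.drop_drop, hd]
                  rfl
                have hstepA : solutionGo cs cs.length (f + 1) i a =
                    solutionGo cs cs.length f (i + 4) (a * 10 + 4) := by
                  simp only [solutionGo, hi, PySem.List.pyGet?_natCast, h0,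
                    show (('f' : Char) ∈ ['0', '1', '2', '3', '4', '5', '6', '7', '8', '9']) = False from by decide, show (('f' : Char) = 'z') = False from by decide, show (('f' : Char) = 'o') = False from by decide, show (('f' : Char) = 't') = False from by decide, pyGet_succ, h1,
                    if_true, if_false]
                have hstepB : valueGo cs cs.length (f + 1) i =
                    ((4 : Int) * 10 ^ (valueGo cs cs.length f (i + 4)).2 + (valueGo cs cs.length f (i + 4)).1,
                      (valueGo cs cs.length f (i + 4)).2 + 1) := by
                  simp only [valueGo, tokenOf, if_neg (by omega : ¬ cs.length ≤ i),
                    if_neg (by omega : ¬ cs.length ≤ i + 1), PySem.List.pyGet?_natCast, h0,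
                    show PySem.Chars.strIsdigit ['f'] = false from by decide, Bool.false_eq_true, show (('f' : Char) = 'z') = False from by decide, show (('f' : Char) = 'o') = False from by decide, show (('f' : Char) = 't') = False from by decide,
                    pyGet_succ, h1, if_true, if_false]
                rw [hstepA, hstepB, ih (i + 4) (a * 10 + 4) (by omega) (by rw [hdk]; exact aTerm_f hval)]
                ring
              · have hdk : cs.drop (i + 4) = r'.drop 2 := by
                  rw [← List.drop_drop, hd]
                  rfl
                have hstepA : solutionGo cs cs.length (f + 1) i a =
                    solutionGo cs cs.length f (i + 4) (a * 10 + 5) := by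
                  simp only [solutionGo, hi, PySem.List.pyGet?_natCast, h0,
                    show (('f' : Char) ∈ ['0', '1', '2', '3', '4', '5', '6', '7', '8', '9']) = False from by decide, show (('f' : Char) = 'z') = False from by decide, show (('f' : Char) = 'o') = False from by decide, show (('f' : Char) = 't') = False from by decide, pyGet_succ, h1, hw,
                    if_true, if_false]
                have hstepB : valueGo cs cs.length (f + 1) i =
                    ((5 : Int) * 10 ^ (valueGo cs cs.length f (i + 4)).2 + (valueGo cs cs.length f (i + 4)).1,
                      (valueGo cs cs.length f (i + 4)).2 + 1) := by
                  simp only [valueGo, tokenOf, if_neg (by omega : ¬ cs.length ≤ i),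
                    if_neg (by omega : ¬ cs.length ≤ i + 1), PySem.List.pyGet?_natCast, h0,
                    show PySem.Chars.strIsdigit ['f'] = false from by decide, Bool.false_eq_true, show (('f' : Char) = 'z') = False from by decide, show (('f' : Char) = 'o') = False from by decide, show (('f' : Char) = 't') = False from by decide,
                    pyGet_succ, h1, hw, if_true, if_false]
                rw [hstepA, hstepB, ih (i + 4) (a * 10 + 5) (by omega) (by rw [hdk]; exact aTerm_f hval)]
                ring
          · -- chunk starting 's': needs the second character
            subst hc
            cases r with
            | nil => exact absurd hval (by decide)
            | cons c2 r' =>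
              have h1 : cs[i + 1]? = some c2 := by simpa using get_of_drop hd 1
              have hi1 : i + 1 < cs.length := by
                have := congrArg List.length hd
                simp [List.length_drop] at this
                omega
              by_cases hw : c2 = 'i'
              · subst hw
                have hdk : cs.drop (i + 3) = r'.drop 1 := by
                  rw [← List.drop_drop, hd]
                  rfl
                have hstepA : solutionGo cs cs.length (f + 1) i a =
                    solutionGo cs cs.length f (i + 3) (a * 10 + 6) := by
                  simp only [solutionGo, hi, PySem.List.pyGet?_natCast, h0,
                    show (('s' : Char) ∈ ['0', '1', '2', '3', '4', '5', '6', '7', '8', '9']) = False from by decide, show (('s' : Char) = 'z') = False from by decide, show (('s' : Char) = 'o') = False from by decide, show (('s' : Char) = 't') = False from by decide, show (('s' : Char) = 'f') = False from by decide, pyGet_succ, h1,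
                    if_true, if_false]
                have hstepB : valueGo cs cs.length (f + 1) i =
                    ((6 : Int) * 10 ^ (valueGo cs cs.length f (i + 3)).2 + (valueGo cs cs.length f (i + 3)).1,
                      (valueGo cs cs.length f (i + 3)).2 + 1) := by
                  simp only [valueGo, tokenOf, if_neg (by omega : ¬ cs.length ≤ i),
                    if_neg (by omega : ¬ cs.length ≤ i + 1), PySem.List.pyGet?_natCast, h0,
                    show PySem.Chars.strIsdigit ['s'] = false from by decide, Bool.false_eq_true, show (('s' : Char) = 'z') = False from by decide, show (('s' : Char) = 'o') = False from by decide, show (('s' : Char) = 't') = False from by decide, show (('s' : Char) = 'f') = False from by decide,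
                    pyGet_succ, h1, if_true, if_false]
                rw [hstepA, hstepB, ih (i + 3) (a * 10 + 6) (by omega) (by rw [hdk]; exact aTerm_si hval)]
                ring
              · have hdk : cs.drop (i + 5) = r'.drop 3 := by
                  rw [← List.drop_drop, hd]
                  rfl
                have hstepA : solutionGo cs cs.length (f + 1) i a =
                    solutionGo cs cs.length f (i + 5) (a * 10 + 7) := by
                  simp only [solutionGo, hi, PySem.List.pyGet?_natCast, h0,
                    show (('s' : Char) ∈ ['0', '1', '2', '3', '4', '5', '6', '7', '8', '9']) = False from by decide, show (('s' : Char) = 'z') = False from by decide, show (('s' : Char) = 'o') = False from by decide, show (('s' : Char) = 't') = False from by decide, show (('s' : Char) = 'f') = False from by decide, pyGet_succ, h1, hw,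
                    if_true, if_false]
                have hstepB : valueGo cs cs.length (f + 1) i =
                    ((7 : Int) * 10 ^ (valueGo cs cs.length f (i + 5)).2 + (valueGo cs cs.length f (i + 5)).1,
                      (valueGo cs cs.length f (i + 5)).2 + 1) := by
                  simp only [valueGo, tokenOf, if_neg (by omega : ¬ cs.length ≤ i),
                    if_neg (by omega : ¬ cs.length ≤ i + 1), PySem.List.pyGet?_natCast, h0,
                    show PySem.Chars.strIsdigit ['s'] = false from by decide, Bool.false_eq_true, show (('s' : Char) = 'z') = False from by decide, show (('s' : Char) = 'o') = False from by decide, show (('s' : Char) = 't') = False from by decide, show (('s' : Char) = 'f') = False from by decide,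
                    pyGet_succ, h1, hw, if_true, if_false]
                rw [hstepA, hstepB, ih (i + 5) (a * 10 + 7) (by omega) (by rw [hdk]; exact aTerm_s hw hval)]
                ring
          · -- chunk starting 'e'
            subst hc
            have hdk : cs.drop (i + 5) = r.drop 4 := by
              rw [← List.drop_drop, hd]
              rfl
            have hstepA : solutionGo cs cs.length (f + 1) i a =
                solutionGo cs cs.length f (i + 5) (a * 10 + 8) := by
              simp only [solutionGo, hi, PySem.List.pyGet?_natCast, h0,
                show (('e' : Char) ∈ ['0', '1', '2', '3', '4', '5', '6', '7', '8', '9']) = False from by decide, show (('e' : Char) = 'z') = False from by decide, show (('e' : Char) = 'o') = False from by decide, show (('e' : Char) = 't') = False from by decide, show (('e' : Char) = 'f') = False from by decide, show (('e' : Char) = 's') = False from by decide, if_true, if_false]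
            have hstepB : valueGo cs cs.length (f + 1) i =
                ((8 : Int) * 10 ^ (valueGo cs cs.length f (i + 5)).2 + (valueGo cs cs.length f (i + 5)).1,
                  (valueGo cs cs.length f (i + 5)).2 + 1) := by
              simp only [valueGo, tokenOf, if_neg (by omega : ¬ cs.length ≤ i),
                PySem.List.pyGet?_natCast, h0,
                show PySem.Chars.strIsdigit ['e'] = false from by decide, Bool.false_eq_true, show (('e' : Char) = 'z') = False from by decide, show (('e' : Char) = 'o') = False from by decide, show (('e' : Char) = 't') = False from by decide, show (('e' : Char) = 'f') = False from by decide, show (('e' : Char) = 's') = False from by decide,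
                if_true, if_false]
            rw [hstepA, hstepB, ih (i + 5) (a * 10 + 8) (by omega) (by rw [hdk]; exact aTerm_e hval)]
            ring
          · -- chunk starting 'n'
            subst hc
            have hdk : cs.drop (i + 4) = r.drop 3 := by
              rw [← List.drop_drop, hd]
              rfl
            have hstepA : solutionGo cs cs.length (f + 1) i a =
                solutionGo cs cs.length f (i + 4) (a * 10 + 9) := by
              simp only [solutionGo, hi, PySem.List.pyGet?_natCast, h0,
                show (('n' : Char) ∈ ['0', '1', '2', '3', '4', '5', '6', '7', '8', '9']) = False from by decide, show (('n' : Char) = 'z') = False from by decide, show (('n' : Char) = 'o') = False from by decide, show (('n' : Char) = 't') = False from by decide, show (('n' : Char) = 'f') = False from by decide, show (('n' : Char) = 's') = False from by decide, show (('n' : Char) = 'e') = False from by decide, if_true, if_false]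
            have hstepB : valueGo cs cs.length (f + 1) i =
                ((9 : Int) * 10 ^ (valueGo cs cs.length f (i + 4)).2 + (valueGo cs cs.length f (i + 4)).1,
                  (valueGo cs cs.length f (i + 4)).2 + 1) := by
              simp only [valueGo, tokenOf, if_neg (by omega : ¬ cs.length ≤ i),
                PySem.List.pyGet?_natCast, h0,
                show PySem.Chars.strIsdigit ['n'] = false from by decide, Bool.false_eq_true, show (('n' : Char) = 'z') = False from by decide, show (('n' : Char) = 'o') = False from by decide, show (('n' : Char) = 't') = False from by decide, show (('n' : Char) = 'f') = False from by decide, show (('n' : Char) = 's') = False from by decide, show (('n' : Char) = 'e') = False from by decide,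
                if_true, if_false]
            rw [hstepA, hstepB, ih (i + 4) (a * 10 + 9) (by omega) (by rw [hdk]; exact aTerm_n hval)]
            ring
    · have hA : solutionGo cs cs.length (f + 1) i a = a := by
        simp only [solutionGo]
        rw [if_neg hi]
      have hB : valueGo cs cs.length (f + 1) i = (0, 0) := by
        simp only [valueGo]
        rw [if_pos (by omega)]
      rw [hA, hB]
      ring

-- ===== VERDICT =====
theorem solution_spec : Claim_equal_solution := by
  intro s _ hpre
  unfold Spec_solution solution solution_alt
  rw [main_loop s.toList s.toList.length 0 0 (by omega) (by simpa using hpre)]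
  ring
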